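-- pv_equiv track=rewrite | github.com/vineetbansal/cutqc2 | cutqc/post_process_helper.py | get_instance_init_meas
-- ===== SOURCE A (Python) =====
-- import itertools
--
-- def get_instance_init_meas(init_label, meas_label):
--     """
--     Convert subcircuit entry init,meas into subcircuit instance init,meas
--     """
--     init_combinations = []
--     for x in init_label:
--         if x == "zero":
--             init_combinations.append(["zero"])
--         elif x == "I":
--             init_combinations.append(["+zero", "+one"])
--         elif x == "X":
--             init_combinations.append(["2plus", "-zero", "-one"])
--         elif x == "Y":
--             init_combinations.append(["2plusI", "-zero", "-one"])
--         elif x == "Z":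
--             init_combinations.append(["+zero", "-one"])
--         else:
--             raise Exception("Illegal initilization symbol :", x)
--     init_combinations = list(itertools.product(*init_combinations))
--
--     subcircuit_init_meas = []
--     for init in init_combinations:
--         subcircuit_init_meas.append((tuple(init), tuple(meas_label)))
--     return subcircuit_init_meas
-- ===== SOURCE B (Python) =====
-- def get_instance_init_meas(init_label, meas_label):
--     """
--     Convert subcircuit entry init,meas into subcircuit instance init,meas
--     """
--     options = {
--         "zero": ["zero"],
--         "I": ["+zero", "+one"],
--         "X": ["2plus", "-zero", "-one"],
--         "Y": ["2plusI", "-zero", "-one"],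
--         "Z": ["+zero", "-one"],
--     }
--     opts = []
--     for x in init_label:
--         if x not in options:
--             raise Exception("Illegal initilization symbol :", x)
--         opts.append(options[x])
--     total = 1
--     for o in opts:
--         total *= len(o)
--     meas = tuple(meas_label)
--     out = []
--     for i in range(total):
--         digits = []
--         r = i
--         for o in reversed(opts):
--             r, d = divmod(r, len(o))
--             digits.append(o[d])
--         digits.reverse()
--         out.append((tuple(digits), meas))
--     return out
-- ===== Notes on version B (the rewrite author's own statement) =====
-- stated objective: alternative
-- what changed: B never materialises the Cartesian product: it computes the total count as the product of the option-list lengths and decodes each index 0..total-1 by repeated divmod over the lengths (mixed-radix, last symbol fastest), indexing directly into the option lists, instead of A's itertools.product over collected lists.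
import Mathlib
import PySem

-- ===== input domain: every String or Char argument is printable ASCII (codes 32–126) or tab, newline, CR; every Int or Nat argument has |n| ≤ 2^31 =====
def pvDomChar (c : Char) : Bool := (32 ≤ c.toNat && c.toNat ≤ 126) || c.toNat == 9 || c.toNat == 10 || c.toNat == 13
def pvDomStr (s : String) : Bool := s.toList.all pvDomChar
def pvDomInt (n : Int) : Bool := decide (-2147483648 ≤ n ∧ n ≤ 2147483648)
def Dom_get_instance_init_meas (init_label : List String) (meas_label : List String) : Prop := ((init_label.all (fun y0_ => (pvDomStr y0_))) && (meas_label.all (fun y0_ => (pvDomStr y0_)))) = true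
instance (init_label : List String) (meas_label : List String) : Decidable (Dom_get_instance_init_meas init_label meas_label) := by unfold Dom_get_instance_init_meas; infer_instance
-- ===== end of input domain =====

-- B enumerates the instances directly by mixed-radix index decoding (divmod over the
-- option-list lengths) instead of A's materialised itertools.product; same cost, no speed claim.

-- ===== PORT A =====
-- if-elif chain of A; [] stands for the branch where the Python raises (excluded by Pre_)
def pvOptsA (x : String) : List String :=
  if x = "zero" then ["zero"]
  else if x = "I" then ["+zero", "+one"]
  else if x = "X" then ["2plus", "-zero", "-one"]
  else if x = "Y" then ["2plusI", "-zero", "-one"]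
  else if x = "Z" then ["+zero", "-one"]
  else []

-- itertools.product: first factor outermost, last factor varies fastest
def pvProduct : List (List String) → List (List String)
  | [] => [[]]
  | l :: ls => l.flatMap (fun x => (pvProduct ls).map (fun rest => x :: rest))

def get_instance_init_meas (init_label : List String) (meas_label : List String) : List (List String × List String) :=
  let init_combinations := init_label.foldl (fun acc x => acc ++ [pvOptsA x]) []
  let init_combinations := pvProduct init_combinations
  init_combinations.foldl (fun acc init => acc ++ [(init, meas_label)]) []

-- ===== PORT B =====
-- the dict lookup of B; [] stands for the branch where the Python raises (excluded by Pre_)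
def pvOptsB (x : String) : List String :=
  (PySem.Dict.ofList [("zero", ["zero"]), ("I", ["+zero", "+one"]),
    ("X", ["2plus", "-zero", "-one"]), ("Y", ["2plusI", "-zero", "-one"]),
    ("Z", ["+zero", "-one"])]).getD x []

-- one step of B's inner loop: r, d = divmod(r, len(o)); digits.append(o[d])
def pvDecStep (rd : Int × List String) (o : List String) : Int × List String :=
  (PySem.Int.floordiv rd.1 (o.length : Int),
   rd.2 ++ [PySem.List.pyGetD o (PySem.Int.mod rd.1 (o.length : Int)) ""])

def get_instance_init_meas_alt (init_label : List String) (meas_label : List String) : List (List String × List String) :=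
  let opts := init_label.foldl (fun acc x => acc ++ [pvOptsB x]) []
  let total := opts.foldl (fun t o => t * (o.length : Int)) 1
  (PySem.List.pyRange 0 total 1).foldl
    (fun out i =>
      let rd := opts.reverse.foldl pvDecStep (i, [])
      out ++ [(rd.2.reverse, meas_label)]) []

-- ===== PRECONDITION & SPEC =====
-- Pre_: every init symbol is a legal one; on any other symbol both Pythons raise.
def Pre_get_instance_init_meas (init_label : List String) (meas_label : List String) : Prop :=
  ∀ x ∈ init_label, x = "zero" ∨ x = "I" ∨ x = "X" ∨ x = "Y" ∨ x = "Z"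
instance (init_label : List String) (meas_label : List String) : Decidable (Pre_get_instance_init_meas init_label meas_label) := by unfold Pre_get_instance_init_meas; infer_instance

def pvWitness_get_instance_init_meas : List String × List String := (["zero", "I", "X"], ["comp", "comp"])

def Spec_get_instance_init_meas (init_label : List String) (meas_label : List String) (out : List (List String × List String)) : Prop := out = get_instance_init_meas_alt init_label meas_label
instance (init_label : List String) (meas_label : List String) (out : List (List String × List String)) : Decidable (Spec_get_instance_init_meas init_label meas_label out) := by unfold Spec_get_instance_init_meas; infer_instance

-- ===== CLAIM =====
def Claim_equal_get_instance_init_meas : Prop := ∀ (init_label : List String) (meas_label : List String), Dom_get_instance_init_meas init_label meas_label → Pre_get_instance_init_meas init_label meas_label → Spec_get_instance_init_meas init_label meas_label (get_instance_init_meas init_label meas_label)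

-- ===== LEMMAS AND PROOFS =====
theorem pvOpts_eq (x : String) : pvOptsB x = pvOptsA x := by
  simp only [pvOptsA]
  by_cases h0 : x = "zero"
  · subst h0; decide
  · by_cases h1 : x = "I"
    · subst h1; decide
    · by_cases h2 : x = "X"
      · subst h2; decide
      · by_cases h3 : x = "Y"
        · subst h3; decide
        · by_cases h4 : x = "Z"
          · subst h4; decide
          · simp only [h0, h1, h2, h3, h4, if_false]
            have e0 : ("zero" == x) = false := by simp [Ne.symm h0]
            have e1 : ("I" == x) = false := by simp [Ne.symm h1]
            have e2 : ("X" == x) = false := by simp [Ne.symm h2]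
            have e3 : ("Y" == x) = false := by simp [Ne.symm h3]
            have e4 : ("Z" == x) = false := by simp [Ne.symm h4]
            simp [pvOptsB, PySem.Dict.ofList, PySem.Dict.getD, PySem.Dict.get?,
              PySem.Dict.empty, PySem.Dict.update, PySem.Dict.insert,
              List.find?, e0, e1, e2, e3, e4]

-- itertools.product with the last factor appended: extend every tuple by each element of o
theorem pvProduct_snoc (ls : List (List String)) (o : List String) :
    pvProduct (ls ++ [o]) = (pvProduct ls).flatMap (fun p => o.map (fun x => p ++ [x])) := by
  induction ls with
  | nil => simp [pvProduct, ← List.map_eq_flatMap]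
  | cons l ls ih =>
    simp only [List.cons_append, pvProduct, ih, List.flatMap_assoc]
    congr 1
    funext x
    rw [List.flatMap_map, List.map_flatMap]
    congr 1
    funext p
    simp [List.map_map, Function.comp]

-- B's 'total' loop computes the product of the lengths
theorem pvTotal_eq (ls : List (List String)) : ∀ (c : Int),
    ls.foldl (fun t o => t * (o.length : Int)) c = c * ((ls.map List.length).prod : Nat) := by
  induction ls with
  | nil => intro c; simp
  | cons l ls ih => intro c; simp [List.foldl, ih, mul_assoc]

-- the digits accumulator threads through B's inner loop
theorem pvDec_acc (ls : List (List String)) : ∀ (r : Int) (acc : List String),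
    ls.foldl pvDecStep (r, acc)
      = ((ls.foldl pvDecStep (r, [])).1, acc ++ (ls.foldl pvDecStep (r, [])).2) := by
  induction ls with
  | nil => intro r acc; simp
  | cons o ls ih =>
    intro r acc
    simp only [List.foldl_cons]
    rw [ih (pvDecStep (r, acc) o).1 (pvDecStep (r, acc) o).2,
        ih (pvDecStep (r, []) o).1 (pvDecStep (r, []) o).2]
    simp [pvDecStep]

theorem pvDec_snoc (ls : List (List String)) (o : List String) (i : Int) :
    (((ls ++ [o]).reverse.foldl pvDecStep (i, [])).2).reverse
      = (((ls.reverse.foldl pvDecStep (PySem.Int.floordiv i (o.length : Int), [])).2).reverse)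
        ++ [PySem.List.pyGetD o (PySem.Int.mod i (o.length : Int)) ""] := by
  rw [List.reverse_append]
  simp only [List.reverse_singleton, List.singleton_append, List.foldl_cons]
  rw [pvDec_acc ls.reverse (pvDecStep (i, []) o).1 (pvDecStep (i, []) o).2]
  simp [pvDecStep]

theorem pvRange_mul (n k : Nat) :
    List.range (n * k) = (List.range n).flatMap (fun j => (List.range k).map (fun d => j * k + d)) := by
  induction n with
  | zero => simp
  | succ n ih =>
    rw [Nat.succ_mul, List.range_add, ih, List.range_succ, List.flatMap_append]
    simp

-- mixed-radix decoding of every index in order IS itertools.product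
theorem pvDecode_product (ls : List (List String)) :
    (PySem.List.pyRange 0 (((ls.map List.length).prod : Nat) : Int) 1).map
      (fun i => ((ls.reverse.foldl pvDecStep (i, [])).2).reverse) = pvProduct ls := by
  induction ls using List.reverseRecOn with
  | nil => decide
  | append_singleton ls o ih =>
    rw [pvProduct_snoc]
    by_cases ho : o = []
    · subst ho
      simp
    · have hk : 0 < o.length := List.length_pos_iff.mpr ho
      rw [← ih]
      simp only [List.map_append, List.map_singleton, List.prod_append, List.prod_cons,
        List.prod_nil, mul_one]
      rw [PySem.List.pyRange_zero_nat, PySem.List.pyRange_zero_nat,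
        pvRange_mul ((ls.map List.length).prod) o.length]
      simp only [List.map_flatMap, List.flatMap_map, List.map_map]
      apply List.flatMap_congr
      intro j hj
      have ho' : o = ((PySem.List.pyRange 0 (PySem.List.len o) 1).map
          (fun d => PySem.List.pyGetD o d "")) := (PySem.List.map_pyGetD_pyRange_zero o "").symm
      conv_rhs => rw [ho']
      rw [PySem.List.len_eq, show ((o.length : Int)) = ((o.length : Nat) : Int) from rfl,
        PySem.List.pyRange_zero_nat, List.map_map, List.map_map]
      apply List.map_congr_left
      intro d hd
      have hdk : d < o.length := List.mem_range.mp hd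
      simp only [Function.comp]
      rw [pvDec_snoc]
      have hdiv : PySem.Int.floordiv ((j * o.length + d : Nat) : Int) ((o.length : Nat) : Int)
          = ((j : Nat) : Int) := by
        rw [PySem.Int.floordiv_natCast]
        congr 1
        rw [Nat.mul_comm j o.length, Nat.mul_add_div hk, Nat.div_eq_of_lt hdk]
        rfl
      have hmod : PySem.Int.mod ((j * o.length + d : Nat) : Int) ((o.length : Nat) : Int)
          = ((d : Nat) : Int) := by
        rw [PySem.Int.mod_natCast]
        congr 1
        rw [Nat.mul_comm j o.length, Nat.mul_add_mod, Nat.mod_eq_of_lt hdk]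
      push_cast at hdiv hmod ⊢
      rw [hdiv, hmod]

-- ===== VERDICT =====
theorem get_instance_init_meas_spec : Claim_equal_get_instance_init_meas := by
  intro init_label meas_label _ _
  unfold Spec_get_instance_init_meas get_instance_init_meas get_instance_init_meas_alt
  simp only [PySem.List.foldl_append_singleton_eq_map, List.nil_append]
  have hopts : init_label.map pvOptsB = init_label.map pvOptsA := by
    apply List.map_congr_left; intro x _; exact pvOpts_eq x
  rw [hopts, pvTotal_eq, one_mul]
  rw [← pvDecode_product (init_label.map pvOptsA), List.map_map]
  simp [Function.comp]
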